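-- pv_equiv track=rewrite | github.com/code-philia/CodeSearch | GraphCodeBERT/codesearch/singleVis/semantic_tree.py | merge_and_update_nodes_in_level
-- ===== SOURCE A (Python) =====
-- def merge_and_update_nodes_in_level(next_level_nodes):
--     """
--     对下一层的节点进行合并并更新，确保其基于合并后的节点。
--
--     :param next_level_nodes: 下一层的节点集合
--     :return: 更新后的下一层节点
--     """
--     merged_nodes = []
--     node_map = {}
--
--     for node in next_level_nodes:
--         key = tuple(node['distribution'])
--         if key in node_map:
--             # 如果节点已存在，合并父节点信息
--             existing_node = node_map[key]
--             existing_node['parent'].extend(node['parent'])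
--         else:
--             # 如果是新节点，则添加到合并节点列表
--             node_map[key] = node
--             merged_nodes.append(node)
--
--     return merged_nodes
-- ===== SOURCE B (Python) =====
-- def merge_and_update_nodes_in_level(next_level_nodes):
--     # Two passes: group nodes by distribution first, then merge each group into its first node.
--     groups = {}
--     for node in next_level_nodes:
--         groups.setdefault(tuple(node['distribution']), []).append(node)
--     result = []
--     for members in groups.values():
--         survivor = members[0]
--         for other in members[1:]:
--             survivor['parent'].extend(other['parent'])
--         result.append(survivor)
--     return result
-- ===== Notes on version B (the rewrite author's own statement) =====
-- stated objective: alternative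
-- what changed: B replaces A's single interleaved dedup-and-merge scan with two passes: first group all nodes into an order-preserving dict keyed by tuple(distribution), then reduce each group by extending the first node's parent list with the parents of the rest.
import Mathlib
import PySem

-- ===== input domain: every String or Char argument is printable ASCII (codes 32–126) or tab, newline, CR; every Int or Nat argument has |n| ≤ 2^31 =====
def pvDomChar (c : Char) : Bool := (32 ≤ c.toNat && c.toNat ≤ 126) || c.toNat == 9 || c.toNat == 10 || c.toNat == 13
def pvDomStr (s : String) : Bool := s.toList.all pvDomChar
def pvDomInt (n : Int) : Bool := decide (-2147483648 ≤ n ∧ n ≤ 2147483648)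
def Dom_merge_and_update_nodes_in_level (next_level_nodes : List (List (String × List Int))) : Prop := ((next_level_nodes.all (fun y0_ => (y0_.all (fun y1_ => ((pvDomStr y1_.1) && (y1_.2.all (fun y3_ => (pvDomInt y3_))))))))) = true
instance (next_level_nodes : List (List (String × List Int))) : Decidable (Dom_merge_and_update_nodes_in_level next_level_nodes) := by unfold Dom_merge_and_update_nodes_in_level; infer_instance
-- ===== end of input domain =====

-- B builds the full grouping table in one pass and then reduces each group, instead of A's
-- interleaved dedup-and-merge scan (same asymptotic cost; equivalence is about the returned
-- value — both Pythons mutate the surviving nodes' 'parent' lists in place identically).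


-- ===== PORT A =====
-- A-side helper: one iteration of A's loop.  In Python, merged_nodes holds references to the very
-- node objects stored in node_map, and the later 'extend' mutates them in place; this is modelled
-- by keeping the first-occurrence key ORDER next to node_map and reading the (mutated) nodes out
-- of node_map at the very end.
def pvStepA (st : List (List Int) × PySem.Dict (List Int) (PySem.Dict String (List Int)))
    (node : List (String × List Int)) :
    List (List Int) × PySem.Dict (List Int) (PySem.Dict String (List Int)) :=
  let nd := PySem.Dict.mk node
  let key := nd.getD "distribution" []
  match st.2.get? key with
  | some existing_node =>
      -- existing_node['parent'].extend(node['parent'])  (in place, through node_map)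
      (st.1, st.2.insert key (existing_node.modify "parent" [] (fun p => p ++ nd.getD "parent" [])))
  | none =>
      (st.1 ++ [key], st.2.insert key nd)

def merge_and_update_nodes_in_level (next_level_nodes : List (List (String × List Int))) :
    List (List (String × List Int)) :=
  let st := next_level_nodes.foldl pvStepA ([], PySem.Dict.empty)
  st.1.map (fun k => (st.2.getD k PySem.Dict.empty).items)

-- ===== PORT B =====
-- B-side helper: pass 1 appends each node to its distribution's group
-- (groups.setdefault(key, []).append(node)).
def pvGroupB (g : PySem.Dict (List Int) (List (PySem.Dict String (List Int))))
    (node : List (String × List Int)) :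
    PySem.Dict (List Int) (List (PySem.Dict String (List Int))) :=
  let nd := PySem.Dict.mk node
  g.modify (nd.getD "distribution" []) [] (fun members => members ++ [nd])

def merge_and_update_nodes_in_level_alt (next_level_nodes : List (List (String × List Int))) :
    List (List (String × List Int)) :=
  let groups := next_level_nodes.foldl pvGroupB PySem.Dict.empty
  groups.values.map (fun members =>
    match members with
    | [] => []   -- unreachable: every group gets at least its first node
    | survivor :: rest =>
        (rest.foldl (fun surv other =>
            surv.modify "parent" [] (fun p => p ++ other.getD "parent" [])) survivor).items)

-- ===== PRECONDITION & SPEC =====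
-- Pre_ excludes inputs on which A raises KeyError (a node without the key "distribution", or two
-- nodes sharing a distribution of which one lacks "parent" — B raises there too), and association
-- lists with duplicate keys inside a node, which cannot arise from a Python dict.
def Pre_merge_and_update_nodes_in_level (next_level_nodes : List (List (String × List Int))) : Prop :=
  (∀ node ∈ next_level_nodes,
      (node.map Prod.fst).Nodup ∧ "distribution" ∈ node.map Prod.fst) ∧
  next_level_nodes.Pairwise (fun a b =>
    (PySem.Dict.mk a).getD "distribution" [] = (PySem.Dict.mk b).getD "distribution" [] →
      ("parent" ∈ a.map Prod.fst ∧ "parent" ∈ b.map Prod.fst))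
instance (next_level_nodes : List (List (String × List Int))) : Decidable (Pre_merge_and_update_nodes_in_level next_level_nodes) := by unfold Pre_merge_and_update_nodes_in_level; infer_instance

def pvWitness_merge_and_update_nodes_in_level : (List (List (String × List Int))) :=
  [[("distribution", [1]), ("parent", [0])], [("distribution", [1]), ("parent", [2])]]

def Spec_merge_and_update_nodes_in_level (next_level_nodes : List (List (String × List Int))) (out : List (List (String × List Int))) : Prop := out = merge_and_update_nodes_in_level_alt next_level_nodes
instance (next_level_nodes : List (List (String × List Int))) (out : List (List (String × List Int))) : Decidable (Spec_merge_and_update_nodes_in_level next_level_nodes out) := by unfold Spec_merge_and_update_nodes_in_level; infer_instance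

-- ===== CLAIM (what is proved, stated in full; the proofs are below) =====
def Claim_equal_merge_and_update_nodes_in_level : Prop := ∀ (next_level_nodes : List (List (String × List Int))), Dom_merge_and_update_nodes_in_level next_level_nodes → Pre_merge_and_update_nodes_in_level next_level_nodes → Spec_merge_and_update_nodes_in_level next_level_nodes (merge_and_update_nodes_in_level next_level_nodes)

-- ===== LEMMAS AND PROOFS =====
-- (The equivalence in fact holds for every input of the Lean ports; Pre_ is only needed so that
-- the ports are faithful to the two Pythons, which raise outside it.)

-- The value B's second pass computes for one group.
def pvMergeGroup (members : List (PySem.Dict String (List Int))) : PySem.Dict String (List Int) :=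
  match members with
  | [] => PySem.Dict.empty
  | s :: rest => rest.foldl (fun surv other =>
      surv.modify "parent" [] (fun p => p ++ other.getD "parent" [])) s

theorem pvMergeGroup_snoc (s : PySem.Dict String (List Int))
    (rest : List (PySem.Dict String (List Int))) (nd : PySem.Dict String (List Int)) :
    pvMergeGroup ((s :: rest) ++ [nd])
      = (pvMergeGroup (s :: rest)).modify "parent" [] (fun p => p ++ nd.getD "parent" []) := by
  simp [pvMergeGroup, List.foldl_append]

-- Invariant tying A's state (key order, node_map) to B's groups dict.
def pvInv (order : List (List Int))
    (m : PySem.Dict (List Int) (PySem.Dict String (List Int)))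
    (g : PySem.Dict (List Int) (List (PySem.Dict String (List Int)))) : Prop :=
  order = g.keys ∧ g.keys.Nodup ∧
  (∀ k, m.get? k = (g.get? k).map pvMergeGroup) ∧
  (∀ k ms, g.get? k = some ms → ms ≠ [])

theorem pvInv_step (order : List (List Int))
    (m : PySem.Dict (List Int) (PySem.Dict String (List Int)))
    (g : PySem.Dict (List Int) (List (PySem.Dict String (List Int))))
    (node : List (String × List Int)) (h : pvInv order m g) :
    pvInv (pvStepA (order, m) node).1 (pvStepA (order, m) node).2 (pvGroupB g node) := by
  obtain ⟨hord, hnd, hget, hne⟩ := h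
  cases hmk : m.get? ((PySem.Dict.mk node).getD "distribution" []) with
  | some existing =>
      obtain ⟨ms, hgg⟩ : ∃ ms, g.get? ((PySem.Dict.mk node).getD "distribution" []) = some ms := by
        cases hgg : g.get? ((PySem.Dict.mk node).getD "distribution" []) with
        | none => rw [hget _, hgg] at hmk; simp at hmk
        | some ms => exact ⟨ms, rfl⟩
      have hex : existing = pvMergeGroup ms := by
        rw [hget _, hgg] at hmk; simpa using hmk.symm
      obtain ⟨s, rest, rfl⟩ : ∃ s rest, ms = s :: rest := by
        cases ms with
        | nil => exact absurd rfl (hne _ [] hgg)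
        | cons s rest => exact ⟨s, rest, rfl⟩
      have hcontains : g.contains ((PySem.Dict.mk node).getD "distribution" []) = true := by
        rw [PySem.Dict.contains_eq_isSome_get?, hgg]; rfl
      have hgD : g.getD ((PySem.Dict.mk node).getD "distribution" []) [] = s :: rest :=
        PySem.Dict.getD_of_get?_eq_some _ _ hgg
      refine ⟨?_, ?_, ?_, ?_⟩
      · simp only [pvStepA, pvGroupB, hmk, PySem.Dict.modify]
        rw [hord, PySem.Dict.keys_insert_of_contains _ _ hcontains]
      · simp only [pvGroupB, PySem.Dict.modify]
        rw [PySem.Dict.keys_insert_of_contains _ _ hcontains]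
        exact hnd
      · intro k
        simp only [pvStepA, pvGroupB, hmk, PySem.Dict.modify]
        rw [PySem.Dict.get?_insert, PySem.Dict.get?_insert]
        by_cases hk : k = (PySem.Dict.mk node).getD "distribution" []
        · simp only [hk, if_pos, hgD, hex, Option.map_some]
          rw [show s :: rest ++ [PySem.Dict.mk node] = (s :: rest) ++ [PySem.Dict.mk node] by simp,
            pvMergeGroup_snoc, PySem.Dict.modify]
        · simp [hk, hget k]
      · intro k msk hmsk
        simp only [pvGroupB, PySem.Dict.modify] at hmsk
        rw [PySem.Dict.get?_insert] at hmsk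
        by_cases hk : k = (PySem.Dict.mk node).getD "distribution" []
        · rw [if_pos hk] at hmsk
          cases hmsk
          simp
        · rw [if_neg hk] at hmsk
          exact hne k msk hmsk
  | none =>
      have hgg : g.get? ((PySem.Dict.mk node).getD "distribution" []) = none := by
        cases hgg : g.get? ((PySem.Dict.mk node).getD "distribution" []) with
        | none => rfl
        | some ms => rw [hget _, hgg] at hmk; simp at hmk
      have hcontains : g.contains ((PySem.Dict.mk node).getD "distribution" []) = false := by
        rw [PySem.Dict.contains_eq_isSome_get?, hgg]; rfl
      have hgD : g.getD ((PySem.Dict.mk node).getD "distribution" []) [] = [] :=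
        PySem.Dict.getD_of_get?_eq_none _ _ hgg
      refine ⟨?_, ?_, ?_, ?_⟩
      · simp only [pvStepA, pvGroupB, hmk, PySem.Dict.modify]
        rw [hord, PySem.Dict.keys_insert_of_not_contains _ _ hcontains]
      · simp only [pvGroupB, PySem.Dict.modify]
        exact PySem.Dict.nodup_keys_insert _ _ _ hnd
      · intro k
        simp only [pvStepA, pvGroupB, hmk, PySem.Dict.modify]
        rw [PySem.Dict.get?_insert, PySem.Dict.get?_insert]
        by_cases hk : k = (PySem.Dict.mk node).getD "distribution" []
        · simp [hk, hgD, pvMergeGroup]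
        · simp [hk, hget k]
      · intro k msk hmsk
        simp only [pvGroupB, PySem.Dict.modify] at hmsk
        rw [PySem.Dict.get?_insert] at hmsk
        by_cases hk : k = (PySem.Dict.mk node).getD "distribution" []
        · rw [if_pos hk] at hmsk
          cases hmsk
          simp
        · rw [if_neg hk] at hmsk
          exact hne k msk hmsk

theorem pvInv_foldl (l : List (List (String × List Int))) :
    ∀ (order : List (List Int)) m g, pvInv order m g →
    pvInv (l.foldl pvStepA (order, m)).1 (l.foldl pvStepA (order, m)).2 (l.foldl pvGroupB g) := by
  induction l with
  | nil => intro order m g h; exact h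
  | cons x xs ih =>
      intro order m g h
      have h' := pvInv_step order m g x h
      simpa using ih (pvStepA (order, m) x).1 (pvStepA (order, m) x).2 (pvGroupB g x) h'

theorem pvReadout (order : List (List Int))
    (m : PySem.Dict (List Int) (PySem.Dict String (List Int)))
    (g : PySem.Dict (List Int) (List (PySem.Dict String (List Int))))
    (h : pvInv order m g) :
    order.map (fun k => (m.getD k PySem.Dict.empty).items)
      = g.values.map (fun members =>
          match members with
          | [] => []
          | survivor :: rest =>
              (rest.foldl (fun surv other =>
                  surv.modify "parent" [] (fun p => p ++ other.getD "parent" [])) survivor).items) := by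
  obtain ⟨hord, hnd, hget, hne⟩ := h
  rw [PySem.Dict.values_eq_map_keys g hnd [], List.map_map, hord]
  apply List.map_congr_left
  intro k hk
  have hsome : ∃ ms, g.get? k = some ms := by
    cases hgg : g.get? k with
    | none => exact absurd ((PySem.Dict.get?_eq_none_iff_not_mem_keys g k).mp hgg) (by simpa using hk)
    | some ms => exact ⟨ms, rfl⟩
  obtain ⟨ms, hgg⟩ := hsome
  obtain ⟨s, rest, rfl⟩ : ∃ s rest, ms = s :: rest := by
    cases ms with
    | nil => exact absurd rfl (hne k [] hgg)
    | cons s rest => exact ⟨s, rest, rfl⟩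
  have hmg : m.getD k PySem.Dict.empty = pvMergeGroup (s :: rest) := by
    rw [PySem.Dict.getD_eq_get?_getD, hget k, hgg]; rfl
  have hgD : g.getD k [] = s :: rest := PySem.Dict.getD_of_get?_eq_some _ _ hgg
  simp [hmg, hgD, pvMergeGroup]

-- ===== VERDICT (by name: the statement is the Claim_ definition above) =====
theorem merge_and_update_nodes_in_level_spec : Claim_equal_merge_and_update_nodes_in_level := by
  intro next_level_nodes _ _
  unfold Spec_merge_and_update_nodes_in_level
  unfold merge_and_update_nodes_in_level merge_and_update_nodes_in_level_alt
  have hbase : pvInv [] PySem.Dict.empty PySem.Dict.empty := by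
    refine ⟨rfl, by simp [PySem.Dict.keys_empty], ?_, ?_⟩
    · intro k; simp [PySem.Dict.get?_empty]
    · intro k ms h; simp [PySem.Dict.get?_empty] at h
  have h := pvInv_foldl next_level_nodes [] PySem.Dict.empty PySem.Dict.empty hbase
  exact pvReadout _ _ _ h
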